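-- pv_equiv track=rewrite | github.com/porcelainruler/InterviewPrep | PythonVSCode/DP_GFG/LongestArthmaticProgression.py | dp
-- ===== SOURCE A (Python) =====
-- def dp(arr: list, n: int):
--     if n <= 2:
--         return n
--
--     dp = [[0]*n for i in range(n)]
--
--     for i in range(n):
--         dp[i][n-1] = 2
--
--     maxEle = 2
--     for j in range(n-2, 0, -1):
--         i = j-1
--         k = j+1
--
--         while i >=0 and k<n:
--             if arr[i] + arr[k] < 2*arr[j]:
--                 k += 1
--             elif arr[i] + arr[k] > 2*arr[j]:
--                 dp[i][j] = 2
--                 i -= 1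
--             else:
--                 dp[i][j] = 1 + dp[j][k]
--                 maxEle = max(maxEle, dp[i][j])
--                 i -= 1
--                 k += 1
--
--         while i >= 0:
--             dp[i][j] = 2
--             i -= 1
--
--     return maxEle
-- ===== SOURCE B (Python) =====
-- def dp(arr, n):
--     if n <= 2:
--         return n
--     vals = set(arr[:n])
--     best = 2
--     for i in range(n - 1):
--         for j in range(i + 1, n):
--             d = arr[j] - arr[i]
--             if d == 0:
--                 continue  # equal elements give no progression step
--             length = 2
--             nxt = arr[j] + d
--             while nxt in vals:
--                 length += 1
--                 nxt += d
--             best = max(best, length)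
--     return best
-- ===== Notes on version B (the rewrite author's own statement) =====
-- stated objective: alternative
-- what changed: Replaces the n-by-n endpoint DP table with the reverse sweep and two-pointer inner loop by a hash set of the values plus, for every pair (i,j), a direct greedy walk that follows the progression arr[j]+d, arr[j]+2d, ... through the set.
-- outside the precondition, e.g. on dp([2, 0, 1], 3): A returns 2, B returns 3; on dp([0, 1, 2, 2, 3, 4], 6): A returns 4, B returns 5
import Mathlib
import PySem

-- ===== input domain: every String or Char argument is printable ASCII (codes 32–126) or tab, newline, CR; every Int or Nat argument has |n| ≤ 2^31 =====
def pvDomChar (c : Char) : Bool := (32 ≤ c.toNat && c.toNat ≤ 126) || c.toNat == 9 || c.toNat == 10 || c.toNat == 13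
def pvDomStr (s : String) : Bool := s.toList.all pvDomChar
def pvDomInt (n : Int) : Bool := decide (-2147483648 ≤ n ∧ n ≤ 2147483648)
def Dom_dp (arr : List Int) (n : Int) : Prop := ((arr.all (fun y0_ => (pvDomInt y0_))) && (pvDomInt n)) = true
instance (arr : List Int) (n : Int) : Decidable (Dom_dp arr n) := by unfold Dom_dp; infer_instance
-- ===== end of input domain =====

-- B replaces A's n×n endpoint DP table with reverse sweep and two-pointer inner loop by a
-- hash set of the values and, per pair, a direct greedy walk along the progression (objective:
-- alternative algorithm, O(n) extra space instead of O(n^2)). Return values proved equal on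
-- Pre_dp (first n elements strictly increasing — the documented domain of A: a sorted set).

-- ===== PORT A =====
-- termination helper for the walk/while recursions (cited by name in decreasing_by)
theorem pv_filter_filter_eq {α : Type} (l : List α) (p q : α → Bool)
    (himp : ∀ x ∈ l, q x = true → p x = true) : (l.filter p).filter q = l.filter q := by
  induction l with
  | nil => rfl
  | cons a t ih =>
    have ht : ∀ x ∈ t, q x = true → p x = true := fun x hx => himp x (List.mem_cons_of_mem a hx)
    by_cases hq : q a = true
    · have hp : p a = true := himp a (List.mem_cons_self) hq
      simp [hp, hq, ih ht]
    · simp only [Bool.not_eq_true] at hq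
      by_cases hp : p a = true <;> simp [hp, hq, ih ht]

theorem pv_filter_len_lt {α : Type} (l : List α) (p q : α → Bool)
    (himp : ∀ x ∈ l, q x = true → p x = true) (x : α) (hx : x ∈ l)
    (hp : p x = true) (hq : q x = false) : (l.filter q).length < (l.filter p).length := by
  rw [← pv_filter_filter_eq l p q himp]
  exact List.length_filter_lt_length_iff_exists.mpr
    ⟨x, List.mem_filter.mpr ⟨hx, hp⟩, by simp [hq]⟩

-- read/write of the 2D table dp[i][j]
def dpGetT (T : List (List Int)) (i j : Int) : Int :=
  PySem.List.pyGetD (PySem.List.pyGetD T i []) j 0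

def dpSetT (T : List (List Int)) (i j : Int) (v : Int) : List (List Int) :=
  PySem.List.pySetD T i (PySem.List.pySetD (PySem.List.pyGetD T i []) j v)

-- first inner while: 'while i >= 0 and k < n'
def dpWhile1 (arr : List Int) (n j : Int) (i k : Int) (T : List (List Int)) (maxEle : Int) :
    List (List Int) × Int × Int :=
  if h : 0 ≤ i ∧ k < n then
    if PySem.List.pyGetD arr i 0 + PySem.List.pyGetD arr k 0 < 2 * PySem.List.pyGetD arr j 0 then
      dpWhile1 arr n j i (k + 1) T maxEle
    else if PySem.List.pyGetD arr i 0 + PySem.List.pyGetD arr k 0 > 2 * PySem.List.pyGetD arr j 0 then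
      dpWhile1 arr n j (i - 1) k (dpSetT T i j 2) maxEle
    else
      let v := 1 + dpGetT T j k
      dpWhile1 arr n j (i - 1) (k + 1) (dpSetT T i j v) (max maxEle v)
  else
    (T, maxEle, i)
termination_by ((i + 1) + (n - k)).toNat
decreasing_by all_goals omega

-- second inner while: 'while i >= 0'
def dpWhile2 (j : Int) (i : Int) (T : List (List Int)) : List (List Int) :=
  if h : 0 ≤ i then dpWhile2 j (i - 1) (dpSetT T i j 2) else T
termination_by (i + 1).toNat
decreasing_by omega

def dp (arr : List Int) (n : Int) : Int :=
  if n ≤ 2 then n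
  else
    let T0 : List (List Int) := (PySem.List.pyRange 0 n 1).map (fun _ => PySem.List.pyRepeat [(0 : Int)] n)
    let T1 := (PySem.List.pyRange 0 n 1).foldl (fun T i => dpSetT T i (n - 1) 2) T0
    let st := (PySem.List.pyRange (n - 2) 0 (-1)).foldl (fun st j =>
      let r := dpWhile1 arr n j (j - 1) (j + 1) st.1 st.2
      (dpWhile2 j r.2.2 r.1, r.2.1)) (T1, (2 : Int))
    st.2

-- ===== PORT B =====
-- 'while nxt in vals: length += 1; nxt += d'  (d ≠ 0 from the guard before the loop)
def dpWalk (vals : PySem.Set Int) (d : Int) (hd : d ≠ 0) (nxt : Int) (len : Int) : Int :=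
  if PySem.Set.contains vals nxt then dpWalk vals d hd (nxt + d) (len + 1) else len
termination_by (vals.filter (fun v => if 0 < d then decide (nxt ≤ v) else decide (v ≤ nxt))).length
decreasing_by
  rename_i hmem
  have hm : nxt ∈ vals := (PySem.Set.contains_iff vals nxt).mp hmem
  have hsub : ∀ v ∈ vals,
      (if 0 < d then decide (nxt + d ≤ v) else decide (v ≤ nxt + d)) = true →
      (if 0 < d then decide (nxt ≤ v) else decide (v ≤ nxt)) = true := by
    intro v _ hv; split at hv <;> split <;> simp_all <;> omega
  have hx1 : (if 0 < d then decide (nxt ≤ nxt) else decide (nxt ≤ nxt)) = true := by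
    split <;> simp
  have hx2 : (if 0 < d then decide (nxt + d ≤ nxt) else decide (nxt ≤ nxt + d)) = false := by
    split <;> simp <;> omega
  exact pv_filter_len_lt vals
    (fun v => if 0 < d then decide (nxt ≤ v) else decide (v ≤ nxt))
    (fun v => if 0 < d then decide (nxt + d ≤ v) else decide (v ≤ nxt + d))
    hsub nxt hm hx1 hx2

def dp_alt (arr : List Int) (n : Int) : Int :=
  if n ≤ 2 then n
  else
    let vals : PySem.Set Int := PySem.Set.ofList (PySem.List.slice arr none (some n))
    (PySem.List.pyRange 0 (n - 1) 1).foldl (fun best i =>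
      (PySem.List.pyRange (i + 1) n 1).foldl (fun best j =>
        let d := PySem.List.pyGetD arr j 0 - PySem.List.pyGetD arr i 0
        if hd : d = 0 then best
        else max best (dpWalk vals d hd (PySem.List.pyGetD arr j 0 + d) 2)) best) 2

-- ===== PRECONDITION & SPEC =====
-- Pre_dp restricts to A's documented domain: a sorted SET, i.e. the first n elements strictly
-- increasing (and n within bounds, so that A does not raise IndexError). It excludes inputs on
-- which A still returns: with an unsorted or duplicate-carrying prefix (n ≥ 3) the two-pointer
-- sweep's pairing is meaningless and A's value is an accident of it, which B does not match.
def Pre_dp (arr : List Int) (n : Int) : Prop :=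
  n ≤ 2 ∨ (n ≤ (arr.length : Int) ∧ (arr.take n.toNat).Pairwise (· < ·))
instance (arr : List Int) (n : Int) : Decidable (Pre_dp arr n) := by unfold Pre_dp; infer_instance

def pvWitness_dp : List Int × Int := ([0, 1, 3, 4, 7], 5)

def Spec_dp (arr : List Int) (n : Int) (out : Int) : Prop := out = dp_alt arr n
instance (arr : List Int) (n : Int) (out : Int) : Decidable (Spec_dp arr n out) := by unfold Spec_dp; infer_instance

-- ===== CLAIM (what is proved, stated in full; the proofs are below) =====
def Claim_equal_dp : Prop := ∀ (arr : List Int) (n : Int), Dom_dp arr n → Pre_dp arr n → Spec_dp arr n (dp arr n)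


-- ===== LEMMAS AND PROOFS =====

-- ---- generic max-fold lemmas ----
theorem pv_maxf_init (l : List Int) (c : Int) : c ≤ l.foldl max c := by
  induction l generalizing c with
  | nil => simp
  | cons a t ih => exact le_trans (le_max_left c a) (ih _)

theorem pv_maxf_mem (l : List Int) (c x : Int) (hx : x ∈ l) : x ≤ l.foldl max c := by
  induction l generalizing c with
  | nil => cases hx
  | cons a t ih =>
    rcases List.mem_cons.mp hx with rfl | h
    · exact le_trans (le_max_right c x) (pv_maxf_init t _)
    · exact ih _ h

theorem pv_maxf_le (l : List Int) (c b : Int) (hc : c ≤ b) (h : ∀ x ∈ l, x ≤ b) :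
    l.foldl max c ≤ b := by
  induction l generalizing c with
  | nil => simpa using hc
  | cons a t ih =>
    exact ih _ (max_le hc (h a List.mem_cons_self)) (fun x hx => h x (List.mem_cons_of_mem a hx))

-- ---- the per-index value function a[x] and the value prefix ----
def aI (arr : List Int) (x : Int) : Int := PySem.List.pyGetD arr x 0

def pfx (arr : List Int) (n : Int) : List Int := arr.take n.toNat

-- number of greedy extension steps v, v+d, v+2d, ... through the value set l (d > 0)
def G (l : List Int) (d v : Int) : Int :=
  if h : 0 < d ∧ v ∈ l then 1 + G l d (v + d) else 0
termination_by (l.filter (fun u => decide (v ≤ u))).length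
decreasing_by
  exact pv_filter_len_lt l (fun u => decide (v ≤ u)) (fun u => decide (v + d ≤ u))
    (fun x _ hx => by simp_all; omega) v h.2 (by simp) (by simp; omega)

-- the common value of pair (x, y): 2 + number of greedy extensions past a[y]
def Ev (arr : List Int) (n : Int) (x y : Int) : Int :=
  2 + G (pfx arr n) (aI arr y - aI arr x) (2 * aI arr y - aI arr x)

-- ---- context ----
structure DpCtx (arr : List Int) (n : Int) : Prop where
  hn : 2 < n
  hlen : n ≤ (arr.length : Int)
  hstrict : ∀ x y : Int, 0 ≤ x → x < y → y < n → aI arr x < aI arr y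

theorem pv_mk_ctx (arr : List Int) (n : Int) (hn : 2 < n) (hlen : n ≤ (arr.length : Int))
    (hs : (arr.take n.toNat).Pairwise (· < ·)) : DpCtx arr n := by
  refine ⟨hn, hlen, ?_⟩
  intro x y hx hxy hyn
  rw [List.pairwise_iff_getElem] at hs
  have hlt : (n.toNat : Int) ≤ (arr.length : Int) := by omega
  have hlen' : n.toNat ≤ arr.length := by exact_mod_cast hlt
  have hxN : x.toNat < n.toNat := by omega
  have hyN : y.toNat < n.toNat := by omega
  have htl : (arr.take n.toNat).length = n.toNat := by
    simp [List.length_take]; omega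
  have := hs x.toNat y.toNat (by omega) (by omega) (by omega)
  simp only [List.getElem_take] at this
  have hax : aI arr x = arr[x.toNat]'(by omega) := by
    unfold aI
    rw [PySem.List.pyGetD_eq_getElem arr 0 hx (by omega)]
  have hay : aI arr y = arr[y.toNat]'(by omega) := by
    unfold aI
    rw [PySem.List.pyGetD_eq_getElem arr 0 (by omega) (by omega)]
  rw [hax, hay]
  exact this

theorem pv_memP (arr : List Int) (n : Int) (hlen : n ≤ (arr.length : Int)) (v : Int) :
    v ∈ pfx arr n ↔ ∃ x : Int, 0 ≤ x ∧ x < n ∧ aI arr x = v := by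
  unfold pfx
  rw [List.mem_iff_getElem]
  constructor
  · rintro ⟨m, hm, hv⟩
    have hmN : m < n.toNat := by
      have := List.length_take_le n.toNat arr
      omega
    have hml : m < arr.length := by
      simp [List.length_take] at hm; omega
    refine ⟨(m : Int), by omega, by omega, ?_⟩
    unfold aI
    rw [PySem.List.pyGetD_eq_getElem arr 0 (by omega) (by omega)]
    simpa [List.getElem_take] using hv
  · rintro ⟨x, hx0, hxn, hv⟩
    have hlt : (n.toNat : Int) ≤ (arr.length : Int) := by omega
    have hlen' : n.toNat ≤ arr.length := by exact_mod_cast hlt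
    have hxN : x.toNat < n.toNat := by omega
    refine ⟨x.toNat, by simp [List.length_take]; omega, ?_⟩
    rw [List.getElem_take]
    unfold aI at hv
    rw [PySem.List.pyGetD_eq_getElem arr 0 hx0 (by omega)] at hv
    exact hv

-- existence of a later matching index ↔ the target value is in the prefix
theorem pv_matchChar (arr : List Int) (n : Int) (C : DpCtx arr n) (x y : Int)
    (hx : 0 ≤ x) (hxy : x < y) (hy : y < n) :
    (∃ k : Int, y < k ∧ k < n ∧ aI arr k = 2 * aI arr y - aI arr x) ↔
      (2 * aI arr y - aI arr x) ∈ pfx arr n := by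
  constructor
  · rintro ⟨k, hyk, hkn, hk⟩
    exact (pv_memP arr n C.hlen _).mpr ⟨k, by omega, hkn, hk⟩
  · intro hmem
    rcases (pv_memP arr n C.hlen _).mp hmem with ⟨k, hk0, hkn, hk⟩
    have hxy' : aI arr x < aI arr y := C.hstrict x y hx hxy hy
    have htgt : aI arr y < aI arr k := by omega
    have hyk : y < k := by
      by_contra hc
      rcases lt_or_eq_of_le (Int.not_lt.mp hc) with h | h
      · have := C.hstrict k y hk0 h hy; omega
      · subst h; omega
    exact ⟨k, hyk, hkn, hk⟩

-- ---- G and Ev facts ----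
theorem pv_G_zero (l : List Int) (d v : Int) (h : ¬(0 < d ∧ v ∈ l)) : G l d v = 0 := by
  rw [G]; simp [h]

theorem pv_G_succ (l : List Int) (d v : Int) (hd : 0 < d) (hv : v ∈ l) :
    G l d v = 1 + G l d (v + d) := by
  rw [G]; simp [hd, hv]

theorem pv_Ev_step (arr : List Int) (n : Int) (C : DpCtx arr n) (x y k : Int)
    (hx : 0 ≤ x) (hxy : x < y) (hyk : y < k) (hk : k < n)
    (hm : aI arr x + aI arr k = 2 * aI arr y) :
    Ev arr n x y = 1 + Ev arr n y k := by
  have hyn : y < n := by omega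
  have hd : 0 < aI arr y - aI arr x := by
    have := C.hstrict x y hx hxy hyn; omega
  have hkv : aI arr k = 2 * aI arr y - aI arr x := by omega
  have ht : (2 * aI arr y - aI arr x) ∈ pfx arr n :=
    (pv_matchChar arr n C x y hx hxy hyn).mp ⟨k, hyk, hk, hkv⟩
  have h1 : aI arr k - aI arr y = aI arr y - aI arr x := by omega
  have h2 : 2 * aI arr k - aI arr y = (2 * aI arr y - aI arr x) + (aI arr y - aI arr x) := by omega
  unfold Ev
  rw [h1, h2, pv_G_succ _ _ _ hd ht]
  omega

theorem pv_Ev_nomatch (arr : List Int) (n : Int) (C : DpCtx arr n) (x y : Int)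
    (hx : 0 ≤ x) (hxy : x < y) (hy : y < n)
    (hno : ∀ k : Int, y < k → k < n → aI arr k ≠ 2 * aI arr y - aI arr x) :
    Ev arr n x y = 2 := by
  have hnm : (2 * aI arr y - aI arr x) ∉ pfx arr n := by
    intro hmem
    rcases (pv_matchChar arr n C x y hx hxy hy).mpr hmem with ⟨k, hyk, hkn, hk⟩
    exact hno k hyk hkn hk
  unfold Ev
  rw [pv_G_zero _ _ _ (by tauto)]
  omega

-- ---- B-side characterization ----
theorem pv_walk_eq_G (l : List Int) (d : Int) (hd : d ≠ 0) (hdpos : 0 < d) (v len : Int) :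
    dpWalk (PySem.Set.ofList l) d hd v len = len + G l d v := by
  induction v using G.induct l d generalizing len with
  | case1 x hx ih =>
    have hc : PySem.Set.contains (PySem.Set.ofList l) x = true := by
      rw [PySem.Set.contains_iff]
      exact (PySem.Set.mem_ofList l x).mpr hx.2
    rw [dpWalk, G, dif_pos hx, hc]
    simp only [if_true]
    rw [ih (len + 1)]
    omega
  | case2 x hx =>
    have hxl : x ∉ l := fun hm => hx ⟨hdpos, hm⟩
    have hc : PySem.Set.contains (PySem.Set.ofList l) x = false := by
      rw [Bool.eq_false_iff]
      intro hcc
      exact hxl ((PySem.Set.mem_ofList l x).mp ((PySem.Set.contains_iff _ _).mp hcc))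
    rw [dpWalk, G, dif_neg hx, hc]
    simp

def pairVals (arr : List Int) (n : Int) : List Int :=
  (PySem.List.pyRange 0 (n - 1) 1).flatMap
    (fun i => (PySem.List.pyRange (i + 1) n 1).map (fun j => Ev arr n i j))

theorem pv_alt_char (arr : List Int) (n : Int) (C : DpCtx arr n) :
    dp_alt arr n = (pairVals arr n).foldl max 2 := by
  have hn2 : ¬ n ≤ 2 := by have := C.hn; omega
  unfold dp_alt pairVals
  rw [if_neg hn2, List.foldl_flatMap]
  simp only [List.foldl_map]
  apply PySem.List.foldl_congr_mem
  intro acc i hi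
  rw [PySem.List.mem_pyRange_one] at hi
  apply PySem.List.foldl_congr_mem
  intro best j hj
  rw [PySem.List.mem_pyRange_one] at hj
  have hdpos : 0 < PySem.List.pyGetD arr j 0 - PySem.List.pyGetD arr i 0 := by
    have := C.hstrict i j hi.1 (by omega) (by omega)
    unfold aI at this
    omega
  rw [dif_neg (by omega)]
  have hslice : PySem.List.slice arr none (some n) = pfx arr n := by
    unfold pfx
    exact PySem.List.slice_to arr (by have := C.hn; omega)
  rw [hslice, pv_walk_eq_G _ _ _ hdpos]
  unfold Ev aI
  have harg : PySem.List.pyGetD arr j 0 + (PySem.List.pyGetD arr j 0 - PySem.List.pyGetD arr i 0)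
      = 2 * PySem.List.pyGetD arr j 0 - PySem.List.pyGetD arr i 0 := by ring
  rw [harg]

theorem pv_mem_pairVals (arr : List Int) (n : Int) (x y : Int)
    (hx : 0 ≤ x) (hxy : x < y) (hy : y < n) : Ev arr n x y ∈ pairVals arr n := by
  unfold pairVals
  refine List.mem_flatMap.mpr ⟨x, ?_, ?_⟩
  · rw [PySem.List.mem_pyRange_one]; omega
  · exact List.mem_map.mpr ⟨y, by rw [PySem.List.mem_pyRange_one]; omega, rfl⟩

theorem pv_pairVals_all (arr : List Int) (n : Int) (b : Int)
    (hb : ∀ x y : Int, 0 ≤ x → x < y → y < n → Ev arr n x y ≤ b) :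
    ∀ v ∈ pairVals arr n, v ≤ b := by
  intro v hv
  unfold pairVals at hv
  rcases List.mem_flatMap.mp hv with ⟨i, hi, hv2⟩
  rcases List.mem_map.mp hv2 with ⟨j, hj, rfl⟩
  rw [PySem.List.mem_pyRange_one] at hi hj
  exact hb i j (by omega) (by omega) (by omega)

-- ---- A-side: table algebra ----
def Sh (n : Int) (T : List (List Int)) : Prop :=
  T.length = n.toNat ∧ ∀ (idx : Nat) (h : idx < T.length), T[idx].length = n.toNat

theorem pv_pyGetD_set {α : Type} (xs : List α) (m : Nat) (r : α) (x : Int) (d : α)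
    (hx : 0 ≤ x) (hm : m < xs.length) :
    PySem.List.pyGetD (xs.set m r) x d = if x = (m : Int) then r else PySem.List.pyGetD xs x d := by
  by_cases hxl : x < (xs.length : Int)
  · have hlen : ((xs.set m r).length : Int) = (xs.length : Int) := by simp
    rw [PySem.List.pyGetD_eq_getElem _ d hx (by omega),
        PySem.List.pyGetD_eq_getElem _ d hx (by omega)]
    rw [List.getElem_set]
    by_cases heq : x = (m : Int)
    · subst heq
      simp
    · rw [if_neg (show ¬ m = x.toNat by omega), if_neg heq]
  · have h1 : PySem.List.pyGet? (xs.set m r) x = none := by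
      rw [PySem.List.pyGet?_eq_none_iff]
      intro hrange
      unfold PySem.Raise.InRange at hrange
      simp at hrange
      omega
    have h2 : PySem.List.pyGet? xs x = none := by
      rw [PySem.List.pyGet?_eq_none_iff]
      intro hrange
      unfold PySem.Raise.InRange at hrange
      omega
    have hne : ¬ (x = (m : Int)) := by omega
    rw [if_neg hne, PySem.List.pyGetD_of_none _ _ _ h1, PySem.List.pyGetD_of_none _ _ _ h2]

theorem pv_Sh_setT (n : Int) (T : List (List Int)) (i j v : Int) (hT : Sh n T)
    (hi : 0 ≤ i) (_hj : 0 ≤ j) : Sh n (dpSetT T i j v) := by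
  obtain ⟨hlen, hrows⟩ := hT
  unfold dpSetT
  rw [PySem.List.pySetD_of_nonneg _ _ hi]
  constructor
  · simpa using hlen
  · intro idx h
    rw [List.getElem_set]
    split
    · rw [PySem.List.length_pySetD]
      rename_i heq
      have hidx : idx < T.length := by simpa using h
      by_cases hin : i < (T.length : Int)
      · rw [PySem.List.pyGetD_eq_getElem _ _ hi (by omega)]
        subst heq
        exact hrows _ (by omega)
      · omega
    · exact hrows _ (by simpa using h)

theorem pv_getT_setT (n : Int) (T : List (List Int)) (i j v x y : Int) (hT : Sh n T)
    (hi : 0 ≤ i) (hi2 : i < n) (hj : 0 ≤ j) (hj2 : j < n) (hx : 0 ≤ x) (hy : 0 ≤ y) :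
    dpGetT (dpSetT T i j v) x y = if x = i ∧ y = j then v else dpGetT T x y := by
  obtain ⟨hlen, hrows⟩ := hT
  have hiT : i.toNat < T.length := by omega
  have hii : ((i.toNat : Nat) : Int) = i := by omega
  unfold dpGetT dpSetT
  rw [PySem.List.pySetD_of_nonneg _ _ hi]
  rw [pv_pyGetD_set T i.toNat _ x _ hx hiT, hii]
  by_cases hxi : x = i
  · rw [if_pos hxi]
    have hrow : PySem.List.pyGetD T i ([] : List Int) = T[i.toNat] := by
      exact PySem.List.pyGetD_eq_getElem _ _ hi (by omega)
    have hrlen : j.toNat < (PySem.List.pyGetD T i ([] : List Int)).length := by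
      rw [hrow, hrows i.toNat hiT]; omega
    have hjj : ((j.toNat : Nat) : Int) = j := by omega
    rw [PySem.List.pySetD_of_nonneg _ _ hj, pv_pyGetD_set _ j.toNat _ y _ hy hrlen, hjj]
    by_cases hyj : y = j
    · simp [hxi, hyj]
    · simp [hxi, hyj]
  · rw [if_neg hxi, if_neg (by tauto)]

-- ---- A-side: loop invariants ----
def ColOK (arr : List Int) (n : Int) (T : List (List Int)) (j : Int) : Prop :=
  ∀ x y : Int, 0 ≤ x → x < y → y < n → j < y → dpGetT T x y = Ev arr n x y

def RowDone (arr : List Int) (n : Int) (T : List (List Int)) (j i : Int) : Prop :=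
  ∀ x : Int, 0 ≤ x → i < x → x < j → dpGetT T x j = Ev arr n x j

def MaxGe (arr : List Int) (n m j i : Int) : Prop :=
  ∀ x : Int, 0 ≤ x → i < x → x < j → Ev arr n x j ≤ m

def MaxPrev (arr : List Int) (n m j : Int) : Prop :=
  ∀ x y : Int, 0 ≤ x → x < y → y < n → j < y → Ev arr n x y ≤ m

theorem pv_w1 (arr : List Int) (n : Int) (C : DpCtx arr n) (b j : Int)
    (hb : ∀ x y : Int, 0 ≤ x → x < y → y < n → Ev arr n x y ≤ b)
    (hj1 : 1 ≤ j) (hj2 : j ≤ n - 2) :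
    ∀ (μ : Nat) (i k : Int) (T : List (List Int)) (m : Int),
      ((i + 1) + (n - k)).toNat = μ →
      i < j → j < k → k ≤ n →
      (0 ≤ i → ∀ k' : Int, j < k' → k' < k → aI arr i + aI arr k' < 2 * aI arr j) →
      Sh n T → ColOK arr n T j → RowDone arr n T j i →
      2 ≤ m → m ≤ b → MaxGe arr n m j i → MaxPrev arr n m j →
      (Sh n (dpWhile1 arr n j i k T m).1 ∧
       ColOK arr n (dpWhile1 arr n j i k T m).1 j ∧
       RowDone arr n (dpWhile1 arr n j i k T m).1 j (dpWhile1 arr n j i k T m).2.2 ∧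
       (∀ x : Int, 0 ≤ x → x ≤ (dpWhile1 arr n j i k T m).2.2 → Ev arr n x j = 2) ∧
       (dpWhile1 arr n j i k T m).2.2 < j ∧
       2 ≤ (dpWhile1 arr n j i k T m).2.1 ∧
       (dpWhile1 arr n j i k T m).2.1 ≤ b ∧
       MaxGe arr n (dpWhile1 arr n j i k T m).2.1 j (dpWhile1 arr n j i k T m).2.2 ∧
       MaxPrev arr n (dpWhile1 arr n j i k T m).2.1 j) := by
  intro μ
  induction μ using Nat.strong_induction_on with
  | _ μ IH =>
    intro i k T m hμ hij hjk hkn hP1 hSh hcol hrow hm2 hmb hmge hmprev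
    have hj0 : (0 : Int) ≤ j := by omega
    have hjn : j < n := by omega
    rw [dpWhile1]
    by_cases hg : 0 ≤ i ∧ k < n
    · rw [dif_pos hg]
      have hin : i < n := by omega
      have hk0 : (0 : Int) ≤ k := by omega
      by_cases hlt : PySem.List.pyGetD arr i 0 + PySem.List.pyGetD arr k 0 < 2 * PySem.List.pyGetD arr j 0
      · rw [if_pos hlt]
        have hlt' : aI arr i + aI arr k < 2 * aI arr j := hlt
        refine IH ((i + 1) + (n - (k + 1))).toNat (by omega) i (k + 1) T m rfl hij (by omega)
          (by omega) ?_ hSh hcol hrow hm2 hmb hmge hmprev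
        intro hi0 k' hk1 hk2
        by_cases hkk : k' < k
        · exact hP1 hi0 k' hk1 hkk
        · have hke : k' = k := by omega
          rw [hke]; exact hlt'
      · rw [if_neg hlt]
        by_cases hgt : PySem.List.pyGetD arr i 0 + PySem.List.pyGetD arr k 0 > 2 * PySem.List.pyGetD arr j 0
        · rw [if_pos hgt]
          have hgt' : aI arr i + aI arr k > 2 * aI arr j := hgt
          have hEv2 : Ev arr n i j = 2 := by
            refine pv_Ev_nomatch arr n C i j hg.1 hij hjn ?_
            intro k'' h1 h2
            by_cases hck : k'' < k
            · have := hP1 hg.1 k'' h1 hck; omega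
            · by_cases hck2 : k'' = k
              · rw [hck2]; omega
              · have := C.hstrict k k'' hk0 (by omega) h2; omega
          have hSh' : Sh n (dpSetT T i j 2) := pv_Sh_setT n T i j 2 hSh hg.1 hj0
          have hget : ∀ x y : Int, 0 ≤ x → 0 ≤ y →
              dpGetT (dpSetT T i j 2) x y = if x = i ∧ y = j then 2 else dpGetT T x y :=
            fun x y hx hy => pv_getT_setT n T i j 2 x y hSh hg.1 hin hj0 hjn hx hy
          refine IH ((i - 1 + 1) + (n - k)).toNat (by omega) (i - 1) k (dpSetT T i j 2) m rfl
            (by omega) hjk hkn ?_ hSh' ?_ ?_ hm2 hmb ?_ hmprev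
          · intro hi0 k' hk1 hk2
            have hs := C.hstrict (i - 1) i (by omega) (by omega) hin
            have := hP1 hg.1 k' hk1 hk2
            omega
          · intro x y hx hxy hyn hjy
            rw [hget x y hx (by omega), if_neg (by omega)]
            exact hcol x y hx hxy hyn hjy
          · intro x hx0 hix hxj
            rw [hget x j hx0 hj0]
            by_cases hxi : x = i
            · rw [if_pos ⟨hxi, rfl⟩, hxi, hEv2]
            · rw [if_neg (by tauto)]
              exact hrow x hx0 (by omega) hxj
          · intro x hx0 hix hxj
            by_cases hxi : x = i
            · rw [hxi, hEv2]; omega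
            · exact hmge x hx0 (by omega) hxj
        · rw [if_neg hgt]
          have heq' : aI arr i + aI arr k = 2 * aI arr j := by
            have h1 : ¬ (aI arr i + aI arr k < 2 * aI arr j) := hlt
            have h2 : ¬ (aI arr i + aI arr k > 2 * aI arr j) := hgt
            omega
          have hTjk : dpGetT T j k = Ev arr n j k := hcol j k hj0 hjk (by omega) hjk
          have hEv : Ev arr n i j = 1 + Ev arr n j k :=
            pv_Ev_step arr n C i j k hg.1 hij hjk (by omega) heq'
          have hv : 1 + dpGetT T j k = Ev arr n i j := by rw [hTjk, hEv]
          have hSh' : Sh n (dpSetT T i j (1 + dpGetT T j k)) :=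
            pv_Sh_setT n T i j _ hSh hg.1 hj0
          have hget : ∀ x y : Int, 0 ≤ x → 0 ≤ y →
              dpGetT (dpSetT T i j (1 + dpGetT T j k)) x y
                = if x = i ∧ y = j then 1 + dpGetT T j k else dpGetT T x y :=
            fun x y hx hy => pv_getT_setT n T i j _ x y hSh hg.1 hin hj0 hjn hx hy
          have hEb : Ev arr n i j ≤ b := hb i j hg.1 hij hjn
          refine IH ((i - 1 + 1) + (n - (k + 1))).toNat (by omega) (i - 1) (k + 1)
            (dpSetT T i j (1 + dpGetT T j k)) (max m (1 + dpGetT T j k)) rfl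
            (by omega) (by omega) (by omega) ?_ hSh' ?_ ?_ (le_trans hm2 (le_max_left _ _)) ?_ ?_ ?_
          · intro hi0 k' hk1 hk2
            have hs := C.hstrict (i - 1) i (by omega) (by omega) hin
            by_cases hkk : k' < k
            · have := hP1 hg.1 k' hk1 hkk; omega
            · have hke : k' = k := by omega
              rw [hke]; omega
          · intro x y hx hxy hyn hjy
            rw [hget x y hx (by omega), if_neg (by omega)]
            exact hcol x y hx hxy hyn hjy
          · intro x hx0 hix hxj
            rw [hget x j hx0 hj0]
            by_cases hxi : x = i
            · rw [if_pos ⟨hxi, rfl⟩, hxi, hv]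
            · rw [if_neg (by tauto)]
              exact hrow x hx0 (by omega) hxj
          · exact max_le hmb (by omega)
          · intro x hx0 hix hxj
            by_cases hxi : x = i
            · rw [hxi, ← hv]; exact le_max_right _ _
            · exact le_trans (hmge x hx0 (by omega) hxj) (le_max_left _ _)
          · intro x y hx hxy hyn hjy
            exact le_trans (hmprev x y hx hxy hyn hjy) (le_max_left _ _)
    · rw [dif_neg hg]
      refine ⟨hSh, hcol, hrow, ?_, hij, hm2, hmb, hmge, hmprev⟩
      intro x hx0 hxi
      have hxi' : x ≤ i := hxi
      clear hxi
      by_cases hi0 : 0 ≤ i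
      · have hkn' : k = n := by omega
        refine pv_Ev_nomatch arr n C x j hx0 (by omega) hjn ?_
        intro k'' h1 h2
        have hP := hP1 hi0 k'' h1 (by omega)
        have hax : aI arr x ≤ aI arr i := by
          by_cases hxe : x = i
          · rw [hxe]
          · have := C.hstrict x i hx0 (by omega) (by omega); omega
        omega
      · omega

theorem pv_w2 (arr : List Int) (n : Int) (_C : DpCtx arr n) (j : Int)
    (hj1 : 1 ≤ j) (hj2 : j ≤ n - 2) :
    ∀ (μ : Nat) (i : Int) (T : List (List Int)),
      (i + 1).toNat = μ → i < j →
      Sh n T → ColOK arr n T j → RowDone arr n T j i →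
      (∀ x : Int, 0 ≤ x → x ≤ i → Ev arr n x j = 2) →
      (Sh n (dpWhile2 j i T) ∧ ColOK arr n (dpWhile2 j i T) j ∧
       ∀ x : Int, 0 ≤ x → x < j → dpGetT (dpWhile2 j i T) x j = Ev arr n x j) := by
  intro μ
  induction μ using Nat.strong_induction_on with
  | _ μ IH =>
    intro i T hμ hij hSh hcol hrow hE2
    have hj0 : (0 : Int) ≤ j := by omega
    have hjn : j < n := by omega
    rw [dpWhile2]
    by_cases hi0 : 0 ≤ i
    · rw [dif_pos hi0]
      have hin : i < n := by omega
      have hSh' : Sh n (dpSetT T i j 2) := pv_Sh_setT n T i j 2 hSh hi0 hj0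
      have hget : ∀ x y : Int, 0 ≤ x → 0 ≤ y →
          dpGetT (dpSetT T i j 2) x y = if x = i ∧ y = j then 2 else dpGetT T x y :=
        fun x y hx hy => pv_getT_setT n T i j 2 x y hSh hi0 hin hj0 hjn hx hy
      refine IH (i - 1 + 1).toNat (by omega) (i - 1) (dpSetT T i j 2) rfl (by omega) hSh' ?_ ?_ ?_
      · intro x y hx hxy hyn hjy
        rw [hget x y hx (by omega), if_neg (by omega)]
        exact hcol x y hx hxy hyn hjy
      · intro x hx0 hix hxj
        rw [hget x j hx0 hj0]
        by_cases hxi : x = i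
        · rw [if_pos ⟨hxi, rfl⟩, hxi, hE2 i hi0 (le_refl i)]
        · rw [if_neg (by tauto)]
          exact hrow x hx0 (by omega) hxj
      · intro x hx0 hxi
        exact hE2 x hx0 (by omega)
    · rw [dif_neg hi0]
      refine ⟨hSh, hcol, ?_⟩
      intro x hx0 hxj
      exact hrow x hx0 (by omega) hxj

theorem pv_outer (arr : List Int) (n : Int) (C : DpCtx arr n) (b : Int)
    (hb : ∀ x y : Int, 0 ≤ x → x < y → y < n → Ev arr n x y ≤ b) :
    ∀ (μ : Nat) (j : Int), j.toNat = μ → 0 ≤ j → j ≤ n - 2 →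
    ∀ (T : List (List Int)) (m : Int),
      Sh n T → ColOK arr n T j → 2 ≤ m → m ≤ b → MaxPrev arr n m j →
      (2 ≤ ((PySem.List.pyRange j 0 (-1)).foldl (fun st j' =>
          let r := dpWhile1 arr n j' (j' - 1) (j' + 1) st.1 st.2
          (dpWhile2 j' r.2.2 r.1, r.2.1)) (T, m)).2 ∧
       ((PySem.List.pyRange j 0 (-1)).foldl (fun st j' =>
          let r := dpWhile1 arr n j' (j' - 1) (j' + 1) st.1 st.2
          (dpWhile2 j' r.2.2 r.1, r.2.1)) (T, m)).2 ≤ b ∧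
       MaxPrev arr n ((PySem.List.pyRange j 0 (-1)).foldl (fun st j' =>
          let r := dpWhile1 arr n j' (j' - 1) (j' + 1) st.1 st.2
          (dpWhile2 j' r.2.2 r.1, r.2.1)) (T, m)).2 0) := by
  intro μ
  induction μ using Nat.strong_induction_on with
  | _ μ IH =>
    intro j hμ hj0 hj2 T m hSh hcol hm2 hmb hmprev
    by_cases hjpos : 0 < j
    · rw [PySem.List.pyRange_neg_one_cons (by omega)]
      simp only [List.foldl_cons]
      have hw1 := pv_w1 arr n C b j hb (by omega) hj2
        ((j - 1 + 1) + (n - (j + 1))).toNat (j - 1) (j + 1) T m rfl (by omega) (by omega)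
        (by omega) (fun _ k' h1 h2 => absurd h1 (by omega)) hSh hcol
        (fun x _ h1 h2 => absurd h1 (by omega)) hm2 hmb
        (fun x _ h1 h2 => absurd h1 (by omega)) hmprev
      obtain ⟨hSh1, hcol1, hrow1, hE21, hilt, hm21, hmb1, hmge1, hmprev1⟩ := hw1
      have hw2 := pv_w2 arr n C j (by omega) hj2
        ((dpWhile1 arr n j (j - 1) (j + 1) T m).2.2 + 1).toNat
        (dpWhile1 arr n j (j - 1) (j + 1) T m).2.2
        (dpWhile1 arr n j (j - 1) (j + 1) T m).1 rfl hilt hSh1 hcol1 hrow1 hE21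
      obtain ⟨hSh2, hcol2, hfull⟩ := hw2
      refine IH (j - 1).toNat (by omega) (j - 1) rfl (by omega) (by omega) _ _ hSh2 ?_ hm21 hmb1 ?_
      · intro x y hx hxy hyn hjy
        by_cases hyj : y = j
        · subst hyj
          exact hfull x hx hxy
        · exact hcol2 x y hx hxy hyn (by omega)
      · intro x y hx hxy hyn hjy
        by_cases hyj : y = j
        · rw [hyj]
          rw [hyj] at hxy
          by_cases hxle : x ≤ (dpWhile1 arr n j (j - 1) (j + 1) T m).2.2
          · rw [hE21 x hx hxle]; exact hm21
          · exact hmge1 x hx (by omega) hxy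
        · exact hmprev1 x y hx hxy hyn (by omega)
    · rw [PySem.List.pyRange_neg_one_eq_nil (by omega)]
      simp only [List.foldl_nil]
      have hj : j = 0 := by omega
      subst hj
      exact ⟨hm2, hmb, hmprev⟩

theorem pv_initFold (arr : List Int) (n : Int) (C : DpCtx arr n) :
    ∀ (μ : Nat) (c : Int), (n - c).toNat = μ → 0 ≤ c → c ≤ n →
    ∀ T : List (List Int), Sh n T →
      (Sh n ((PySem.List.pyRange c n 1).foldl (fun T i => dpSetT T i (n - 1) 2) T) ∧
       ∀ x : Int, 0 ≤ x → x < n →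
         (c ≤ x → dpGetT ((PySem.List.pyRange c n 1).foldl (fun T i => dpSetT T i (n - 1) 2) T) x (n - 1) = 2) ∧
         (x < c → dpGetT ((PySem.List.pyRange c n 1).foldl (fun T i => dpSetT T i (n - 1) 2) T) x (n - 1)
            = dpGetT T x (n - 1))) := by
  intro μ
  induction μ using Nat.strong_induction_on with
  | _ μ IH =>
    intro c hμ hc0 hcn T hT
    by_cases hlt : c < n
    · rw [PySem.List.pyRange_one_cons hlt]
      simp only [List.foldl_cons]
      have hT' : Sh n (dpSetT T c (n - 1) 2) :=
        pv_Sh_setT n T c (n - 1) 2 hT hc0 (by have := C.hn; omega)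
      have hrec := IH (n - (c + 1)).toNat (by omega) (c + 1) rfl (by omega) (by omega)
        (dpSetT T c (n - 1) 2) hT'
      refine ⟨hrec.1, ?_⟩
      intro x hx0 hxn
      have hget := pv_getT_setT n T c (n - 1) 2 x (n - 1) hT hc0 hlt
        (by have := C.hn; omega) (by omega) hx0 (by have := C.hn; omega)
      constructor
      · intro hcx
        by_cases hxc : x = c
        · rw [(hrec.2 x hx0 hxn).2 (by omega), hget, if_pos ⟨hxc, rfl⟩]
        · exact (hrec.2 x hx0 hxn).1 (by omega)
      · intro hxc
        rw [(hrec.2 x hx0 hxn).2 (by omega), hget, if_neg (by omega)]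
    · rw [PySem.List.pyRange_one_eq_nil (by omega)]
      simp only [List.foldl_nil]
      refine ⟨hT, ?_⟩
      intro x hx0 hxn
      exact ⟨fun h => absurd h (by omega), fun _ => by trivial⟩

theorem pv_init (arr : List Int) (n : Int) (C : DpCtx arr n) :
    Sh n ((PySem.List.pyRange 0 n 1).foldl (fun T i => dpSetT T i (n - 1) 2)
        ((PySem.List.pyRange 0 n 1).map (fun _ => PySem.List.pyRepeat [(0 : Int)] n))) ∧
    ColOK arr n ((PySem.List.pyRange 0 n 1).foldl (fun T i => dpSetT T i (n - 1) 2)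
        ((PySem.List.pyRange 0 n 1).map (fun _ => PySem.List.pyRepeat [(0 : Int)] n))) (n - 2) := by
  have hSh0 : Sh n ((PySem.List.pyRange 0 n 1).map (fun _ => PySem.List.pyRepeat [(0 : Int)] n)) := by
    constructor
    · rw [List.length_map, PySem.List.length_pyRange_one]
      omega
    · intro idx h
      rw [List.getElem_map, PySem.List.pyRepeat_singleton, List.length_replicate]
  have h := pv_initFold arr n C (n - 0).toNat 0 rfl (by omega) (by have := C.hn; omega) _ hSh0
  refine ⟨h.1, ?_⟩
  intro x y hx0 hxy hyn hy2
  have hy : y = n - 1 := by omega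
  subst hy
  rw [(h.2 x hx0 (by omega)).1 hx0]
  symm
  have h2 : Ev arr n x (n - 1) = 2 :=
    pv_Ev_nomatch arr n C x (n - 1) hx0 hxy (by omega) (fun k hk1 hk2 => by omega)
  omega

theorem pv_dp_bounds (arr : List Int) (n : Int) (C : DpCtx arr n) (b : Int)
    (hb : ∀ x y : Int, 0 ≤ x → x < y → y < n → Ev arr n x y ≤ b) (hb2 : 2 ≤ b) :
    (2 ≤ dp arr n ∧ dp arr n ≤ b ∧ ∀ x y : Int, 0 ≤ x → x < y → y < n → Ev arr n x y ≤ dp arr n) := by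
  have hn2 : ¬ n ≤ 2 := by have := C.hn; omega
  obtain ⟨hSh1, hcol1⟩ := pv_init arr n C
  have hmprev0 : MaxPrev arr n 2 (n - 2) := by
    intro x y hx hxy hyn hjy
    have hy : y = n - 1 := by omega
    rw [hy, pv_Ev_nomatch arr n C x (n - 1) hx (by omega) (by omega)
      (fun k h1 h2 => absurd h1 (by omega))]
  have hout := pv_outer arr n C b hb (n - 2).toNat (n - 2) rfl (by omega) (by omega)
    _ 2 hSh1 hcol1 (le_refl 2) hb2 hmprev0
  unfold dp
  rw [if_neg hn2]
  exact ⟨hout.1, hout.2.1, fun x y hx hxy hyn => hout.2.2 x y hx hxy hyn (by omega)⟩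

-- ===== VERDICT (by name: the statement is the Claim_ definition above) =====
theorem dp_spec : Claim_equal_dp := by
  unfold Claim_equal_dp
  intro arr n _ hpre
  unfold Spec_dp
  by_cases hn : n ≤ 2
  · unfold dp dp_alt; simp [hn]
  · rcases hpre with h2 | ⟨hlen, hs⟩
    · omega
    have C : DpCtx arr n := pv_mk_ctx arr n (by omega) hlen hs
    have halt := pv_alt_char arr n C
    have haltge : ∀ x y : Int, 0 ≤ x → x < y → y < n → Ev arr n x y ≤ dp_alt arr n := by
      intro x y hx hxy hy
      rw [halt]; exact pv_maxf_mem _ _ _ (pv_mem_pairVals arr n x y hx hxy hy)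
    have halt2 : 2 ≤ dp_alt arr n := by rw [halt]; exact pv_maxf_init _ _
    have hdp := pv_dp_bounds arr n C (dp_alt arr n) haltge halt2
    have hle : dp_alt arr n ≤ dp arr n := by
      rw [halt]
      exact pv_maxf_le _ _ _ hdp.1 (pv_pairVals_all arr n (dp arr n) hdp.2.2)
    omega
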